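-- pv_equiv track=rewrite | github.com/AnthusAI/Biblicus | src/biblicus/analysis/markov.py | _speaker_filtered_text
-- ===== SOURCE A (Python) =====
-- from typing import Dict, List, Optional, Sequence, Tuple
--
-- def _speaker_filtered_text(text: str) -> str:
--     lines = text.splitlines()
--     speaker_prefix = "Speaker 0:"
--     if any(line.startswith(speaker_prefix) for line in lines):
--         cleaned: List[str] = []
--         for line in lines:
--             if line.startswith(speaker_prefix):
--                 cleaned.append(line[len(speaker_prefix) :].strip())
--         return "\n".join(cleaned)
--     return text
-- ===== SOURCE B (Python) =====
-- def _speaker_filtered_text(text: str) -> str: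
--     prefix = "Speaker 0:"
--
--     def collect(lines):
--         # Recursively return the cleaned suffixes of matching lines,
--         # or None when no line in `lines` matches the prefix.
--         if not lines:
--             return None
--         rest = collect(lines[1:])
--         if lines[0].startswith(prefix):
--             return [lines[0][len(prefix):].strip()] + (rest if rest is not None else [])
--         return rest
--
--     cleaned = collect(text.splitlines())
--     return text if cleaned is None else "\n".join(cleaned)
-- ===== Notes on version B (the rewrite author's own statement) =====
-- stated objective: alternative
-- what changed: Replaces A's any() guard scan plus an imperative accumulator loop with a single structural recursion over the line list that returns an Optional result (None = no match) built back-to-front, so the match/no-match decision and the cleaned list come from one traversal.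
import Mathlib
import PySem

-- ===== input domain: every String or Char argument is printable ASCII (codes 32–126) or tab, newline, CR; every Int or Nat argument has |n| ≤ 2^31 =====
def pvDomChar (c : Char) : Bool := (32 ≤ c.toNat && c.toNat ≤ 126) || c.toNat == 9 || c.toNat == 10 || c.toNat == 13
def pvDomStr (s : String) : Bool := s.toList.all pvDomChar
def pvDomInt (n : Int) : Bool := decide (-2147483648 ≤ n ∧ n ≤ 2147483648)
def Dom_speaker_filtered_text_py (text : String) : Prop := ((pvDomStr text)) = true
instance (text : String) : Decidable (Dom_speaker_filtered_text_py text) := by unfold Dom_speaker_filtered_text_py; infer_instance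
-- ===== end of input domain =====

-- B replaces A's any() guard pass plus imperative accumulator loop with one structural
-- recursion over the lines returning an Optional cleaned list (objective: alternative).


-- ===== PORT A =====
def speaker_filtered_text_py (text : String) : String :=
  let lines := PySem.Str.splitlines text
  let speaker_prefix := "Speaker 0:"
  if lines.any (fun line => PySem.Str.startswith line speaker_prefix) then
    let cleaned := lines.foldl (fun acc line =>
      if PySem.Str.startswith line speaker_prefix then
        acc ++ [PySem.Str.strip (PySem.Str.slice line (some (PySem.Str.len speaker_prefix : Int)) none)]
      else acc) []
    PySem.Str.join "\n" cleaned
  else text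

-- ===== PORT B =====
-- Source B's inner recursive helper `collect`: None = no matching line.
def pvCollect : List String → Option (List String)
  | [] => none
  | l :: ls =>
    let rest := pvCollect ls
    if PySem.Str.startswith l "Speaker 0:" then
      some ([PySem.Str.strip (PySem.Str.slice l (some (PySem.Str.len "Speaker 0:" : Int)) none)] ++ rest.getD [])
    else rest

def speaker_filtered_text_py_alt (text : String) : String :=
  match pvCollect (PySem.Str.splitlines text) with
  | none => text
  | some cleaned => PySem.Str.join "\n" cleaned

-- ===== PRECONDITION & SPEC =====
def Spec_speaker_filtered_text_py (text : String) (out : String) : Prop := out = speaker_filtered_text_py_alt text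
instance (text : String) (out : String) : Decidable (Spec_speaker_filtered_text_py text out) := by unfold Spec_speaker_filtered_text_py; infer_instance

-- ===== CLAIM (what is proved, stated in full; the proofs are below) =====
def Claim_equal_speaker_filtered_text_py : Prop := ∀ (text : String), Dom_speaker_filtered_text_py text → Spec_speaker_filtered_text_py text (speaker_filtered_text_py text)

-- ===== LEMMAS AND PROOFS =====

-- Characterisation of B's recursion: it yields `some (map clean (filter matching lines))`
-- exactly when some line matches, `none` otherwise.
theorem pvCollect_eq (l : List String) :
    pvCollect l =
      if l.any (fun line => PySem.Str.startswith line "Speaker 0:") then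
        some ((l.filter (fun line => PySem.Str.startswith line "Speaker 0:")).map
          (fun line => PySem.Str.strip (PySem.Str.slice line (some (PySem.Str.len "Speaker 0:" : Int)) none)))
      else none := by
  induction l with
  | nil => simp [pvCollect]
  | cons x xs ih =>
    rw [pvCollect, ih, List.any_cons, List.filter_cons]
    by_cases hx : PySem.Str.startswith x "Speaker 0:" = true
    · by_cases ha : (xs.any (fun line => PySem.Str.startswith line "Speaker 0:")) = true
      · rw [if_pos hx, if_pos ha, if_pos hx, if_pos (by rw [hx, ha]; rfl)]
        rfl
      · have hfil : xs.filter (fun line => PySem.Str.startswith line "Speaker 0:") = [] := by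
          rw [List.filter_eq_nil_iff]
          intro a hmem hpa
          exact ha (List.any_eq_true.mpr ⟨a, hmem, hpa⟩)
        rw [if_pos hx, if_neg ha, if_pos hx, if_pos (by rw [hx]; rfl), hfil]
        rfl
    · by_cases ha : (xs.any (fun line => PySem.Str.startswith line "Speaker 0:")) = true
      · rw [if_neg hx, if_pos ha, if_neg hx,
           if_pos (by rw [ha, Bool.eq_false_iff.mpr hx]; rfl)]
      · rw [if_neg hx, if_neg ha, if_neg hx,
           if_neg (by rw [Bool.eq_false_iff.mpr hx, Bool.eq_false_iff.mpr ha]; exact Bool.false_ne_true)]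

-- ===== VERDICT (by name: the statement is the Claim_ definition above) =====
theorem speaker_filtered_text_py_spec : Claim_equal_speaker_filtered_text_py := by
  intro text _
  unfold Spec_speaker_filtered_text_py speaker_filtered_text_py speaker_filtered_text_py_alt
  simp only [PySem.List.foldl_append_if, List.nil_append]
  rw [pvCollect_eq]
  by_cases h : ((PySem.Str.splitlines text).any (fun line => PySem.Str.startswith line "Speaker 0:")) = true
  · rw [if_pos h, if_pos h]
  · rw [if_neg h, if_neg h]
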